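-- pv_equiv track=rewrite | github.com/zhuobinggang/research | sector/index.py | ordered_index
-- ===== SOURCE A (Python) =====
-- def ordered_index(list_of_num, MAX_INT = 99999):
--   l = list_of_num
--   result = []
--   minus = MAX_INT
--   record_index = -1
--   for _ in range(len(l)):
--     minus = MAX_INT
--     record_index = -1
--     for index,num in enumerate(l):
--       if num != MAX_INT and num < minus:
--         minus = num
--         record_index = index
--     if record_index != -1:
--       l[record_index] = MAX_INT
--       result.append(record_index)
--   return result
-- ===== SOURCE B (Python) =====
-- def ordered_index(list_of_num, MAX_INT=99999):
--     pairs = sorted((v, i) for i, v in enumerate(list_of_num) if v < MAX_INT)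
--     for _, i in pairs:
--         list_of_num[i] = MAX_INT
--     return [i for _, i in pairs]
-- ===== Notes on version B (the rewrite author's own statement) =====
-- stated objective: faster
-- what changed: Replaces A's repeated selection scan over the mutated list (n full passes) by one filter + one library sort of (value, index) pairs, whose index projection is the answer; the same slots are then set to MAX_INT in place.
import Mathlib
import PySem

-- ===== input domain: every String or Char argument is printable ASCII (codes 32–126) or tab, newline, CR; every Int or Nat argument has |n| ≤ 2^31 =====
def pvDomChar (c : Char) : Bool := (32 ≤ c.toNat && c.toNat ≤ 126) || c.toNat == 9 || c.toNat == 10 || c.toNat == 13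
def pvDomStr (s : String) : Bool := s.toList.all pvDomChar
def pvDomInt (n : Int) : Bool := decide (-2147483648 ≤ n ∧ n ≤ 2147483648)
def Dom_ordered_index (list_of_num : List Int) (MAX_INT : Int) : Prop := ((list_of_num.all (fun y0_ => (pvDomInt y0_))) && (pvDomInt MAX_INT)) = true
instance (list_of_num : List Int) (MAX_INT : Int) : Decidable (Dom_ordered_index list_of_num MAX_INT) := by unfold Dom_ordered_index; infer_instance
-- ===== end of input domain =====

-- B replaces A's O(n^2) repeated selection scans by one filter + one sort of (value, index)
-- pairs (O(n log n)); both mutate the argument identically in Python, equivalence proved on the return value.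


-- ===== PORT A =====
-- the inner 'for index,num in enumerate(l)' selection scan, accumulator (minus, record_index)
def ordered_index_inner (l : List Int) (MAX_INT : Int) : Int × Int :=
  (PySem.List.enumerate l).foldl
    (fun mr p => if p.2 ≠ MAX_INT ∧ p.2 < mr.1 then (p.2, p.1) else mr)
    (MAX_INT, -1)

-- one iteration of the outer loop body on the state (l, result);
-- record_index ≥ 0 whenever it is ≠ -1 (it comes from enumerate), so '.toNat' is exact here
def ordered_index_step (MAX_INT : Int) (st : List Int × List Int) : List Int × List Int :=
  let mr := ordered_index_inner st.1 MAX_INT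
  if mr.2 ≠ -1 then (st.1.set mr.2.toNat MAX_INT, st.2 ++ [mr.2]) else st

def ordered_index (list_of_num : List Int) (MAX_INT : Int) : List Int :=
  ((PySem.List.pyRange 0 (list_of_num.length : Int) 1).foldl
    (fun st _ => ordered_index_step MAX_INT st) (list_of_num, [])).2

-- ===== PORT B =====
-- Source B: pairs = sorted((v, i) for i, v in enumerate(list_of_num) if v < MAX_INT); return [i for _, i in pairs].
-- Source B's write-back loop 'list_of_num[i] = MAX_INT' is an in-place side effect with no role in the
-- return value (and A performs the identical mutation); Lean lists are immutable, so it has no port.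
def ordered_index_alt (list_of_num : List Int) (MAX_INT : Int) : List Int :=
  let pairs := PySem.List.sorted2
      (((PySem.List.enumerate list_of_num).filter (fun p => p.2 < MAX_INT)).map (fun p => (p.2, p.1)))
      (fun q => q.1) (fun q => q.2)
  pairs.map (fun q => q.2)

-- ===== PRECONDITION & SPEC =====
def Spec_ordered_index (list_of_num : List Int) (MAX_INT : Int) (out : List Int) : Prop := out = ordered_index_alt list_of_num MAX_INT
instance (list_of_num : List Int) (MAX_INT : Int) (out : List Int) : Decidable (Spec_ordered_index list_of_num MAX_INT out) := by unfold Spec_ordered_index; infer_instance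

-- ===== CLAIM (what is proved, stated in full; the proofs are below) =====
def Claim_equal_ordered_index : Prop := ∀ (list_of_num : List Int) (MAX_INT : Int), Dom_ordered_index list_of_num MAX_INT → Spec_ordered_index list_of_num MAX_INT (ordered_index list_of_num MAX_INT)

-- ===== LEMMAS AND PROOFS =====

-- (index, value) pairs of the slots still strictly below MAX_INT, in index order
def pvValid (MAX_INT : Int) (l : List Int) : List (Int × Int) :=
  (PySem.List.enumerate l).filter (fun p => p.2 < MAX_INT)

-- lexicographic ≤ on (value, index) pairs
def pvR (a b : Int × Int) : Prop := a.1 < b.1 ∨ (a.1 = b.1 ∧ a.2 ≤ b.2)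

def pvBf (a b : Int × Int) : Bool := decide (a.1 < b.1) || (!decide (b.1 < a.1) && decide (a.2 < b.2))

def pvSort (xs : List (Int × Int)) : List (Int × Int) :=
  PySem.List.sorted2 xs (fun q => q.1) (fun q => q.2)

-- B's result as a function of the current list
def pvS (MAX_INT : Int) (l : List Int) : List Int :=
  (pvSort ((pvValid MAX_INT l).map (fun p => (p.2, p.1)))).map (fun q => q.2)

theorem pvSort_eq_foldl (xs : List (Int × Int)) :
    pvSort xs = xs.foldl (fun acc x => PySem.List.insertBy pvBf x acc) [] := rfl

theorem pvBf_true {a b : Int × Int} (h : pvBf a b = true) : pvR a b := by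
  simp [pvBf] at h; unfold pvR; omega

theorem pvBf_false {a b : Int × Int} (h : pvBf a b = false) : pvR b a := by
  simp [pvBf] at h; unfold pvR; omega

theorem pvR_trans {a b c : Int × Int} (h1 : pvR a b) (h2 : pvR b c) : pvR a c := by
  unfold pvR at *; omega

theorem pvR_antisymm {a b : Int × Int} (h1 : pvR a b) (h2 : pvR b a) : a = b := by
  unfold pvR at *
  have : a.1 = b.1 ∧ a.2 = b.2 := by omega
  exact Prod.ext this.1 this.2

theorem pv_insertBy_pairwise {x : Int × Int} {ys : List (Int × Int)}
    (h : ys.Pairwise pvR) : (PySem.List.insertBy pvBf x ys).Pairwise pvR := by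
  induction ys with
  | nil => simp [PySem.List.insertBy]
  | cons y ys ih =>
    rcases List.pairwise_cons.mp h with ⟨hy, hys⟩
    simp only [PySem.List.insertBy]
    by_cases hbf : pvBf x y = true
    · simp only [hbf, if_true]
      refine List.pairwise_cons.mpr ⟨?_, h⟩
      intro z hz
      rcases List.mem_cons.mp hz with rfl | hz
      · exact pvBf_true hbf
      · exact pvR_trans (pvBf_true hbf) (hy z hz)
    · rw [if_neg hbf]
      refine List.pairwise_cons.mpr ⟨?_, ih hys⟩
      intro z hz
      rcases (PySem.List.mem_insertBy pvBf x z ys).mp hz with rfl | hz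
      · exact pvBf_false (by simpa using hbf)
      · exact hy z hz

theorem pv_foldl_insert_pairwise (xs : List (Int × Int)) :
    ∀ acc : List (Int × Int), acc.Pairwise pvR →
      (xs.foldl (fun acc x => PySem.List.insertBy pvBf x acc) acc).Pairwise pvR := by
  induction xs with
  | nil => intro acc h; simpa using h
  | cons x xs ih =>
    intro acc h
    simpa using ih _ (pv_insertBy_pairwise h)

theorem pvSort_pairwise (xs : List (Int × Int)) : (pvSort xs).Pairwise pvR := by
  rw [pvSort_eq_foldl]
  exact pv_foldl_insert_pairwise xs [] List.Pairwise.nil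

theorem pvSort_perm (xs : List (Int × Int)) : (pvSort xs).Perm xs :=
  PySem.List.sorted2_perm xs _ _ false

theorem pvSort_eq {xs ys : List (Int × Int)} (hperm : ys.Perm xs) (hys : ys.Pairwise pvR) :
    pvSort xs = ys := by
  refine List.Perm.eq_of_pairwise ?_ (pvSort_pairwise xs) hys ((pvSort_perm xs).trans hperm.symm)
  intro a b _ _ h1 h2
  exact pvR_antisymm h1 h2

-- the inner selection fold, generalized over accumulator and enumeration start
def pvInnerF (MAX_INT : Int) (xs : List Int) (s m r : Int) : Int × Int :=
  (PySem.List.enumerate xs s).foldl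
    (fun mr p => if p.2 ≠ MAX_INT ∧ p.2 < mr.1 then (p.2, p.1) else mr) (m, r)

theorem pvInner_eq (l : List Int) (MAX_INT : Int) :
    ordered_index_inner l MAX_INT = pvInnerF MAX_INT l 0 MAX_INT (-1) := rfl

theorem pvInnerF_nil (MAX_INT s m r : Int) : pvInnerF MAX_INT [] s m r = (m, r) := rfl

theorem pvInnerF_cons (MAX_INT : Int) (x : Int) (xs : List Int) (s m r : Int) :
    pvInnerF MAX_INT (x :: xs) s m r =
      if x ≠ MAX_INT ∧ x < m then pvInnerF MAX_INT xs (s+1) x s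
      else pvInnerF MAX_INT xs (s+1) m r := by
  simp only [pvInnerF, PySem.List.enumerate_cons, List.foldl_cons]
  by_cases h : x ≠ MAX_INT ∧ x < m <;> simp [h]

theorem pv_inner_go (MAX_INT : Int) (xs : List Int) :
    ∀ (s m r : Int), m ≤ MAX_INT →
    (pvInnerF MAX_INT xs s m r = (m, r) ∧ ∀ (j : Nat) (hj : j < xs.length), ¬ (xs[j] < m))
    ∨ (∃ (k : Nat) (hk : k < xs.length), pvInnerF MAX_INT xs s m r = (xs[k], s + k) ∧ xs[k] < m ∧
        (∀ (j : Nat) (hj : j < xs.length), j < k → xs[k] < xs[j]) ∧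
        (∀ (j : Nat) (hj : j < xs.length), k < j → xs[k] ≤ xs[j])) := by
  induction xs with
  | nil => intro s m r _; left; exact ⟨pvInnerF_nil _ _ _ _, by intro j hj; simp at hj⟩
  | cons x t ih =>
    intro s m r hm
    rw [pvInnerF_cons]
    by_cases hcond : x ≠ MAX_INT ∧ x < m
    · have hx : x < m := hcond.2
      rw [if_pos hcond]
      rcases ih (s+1) x s (by omega) with ⟨heq, hall⟩ | ⟨k, hk, heq, hlt, hbefore, hafter⟩
      · right
        refine ⟨0, by simp, ?_, ?_, ?_, ?_⟩
        · rw [heq]; simp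
        · simpa using hx
        · intro j hj hj0; omega
        · intro j hj h0j
          have hj' : j - 1 < t.length := by simp at hj; omega
          have := hall (j-1) hj'
          have hget : (x :: t)[j] = t[j-1] := by
            rcases Nat.exists_eq_add_of_lt h0j with _
            cases j with
            | zero => omega
            | succ j' => simp
          rw [hget]; simpa using this
      · right
        refine ⟨k+1, by simpa using hk, ?_, ?_, ?_, ?_⟩
        · rw [heq]
          simp only [List.getElem_cons_succ]
          have harith : s + 1 + (k : Int) = s + ((k + 1 : Nat) : Int) := by push_cast; ring
          rw [harith]
        · have : t[k] < x := hlt; simp; omega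
        · intro j hj hjk
          cases j with
          | zero => simpa using (by simpa using hlt : t[k] < x)
          | succ j' =>
            simp only [List.getElem_cons_succ]
            exact hbefore j' (by simpa using hj) (by omega)
        · intro j hj hkj
          cases j with
          | zero => omega
          | succ j' =>
            simp only [List.getElem_cons_succ]
            exact hafter j' (by simpa using hj) (by omega)
    · rw [if_neg hcond]
      rcases ih (s+1) m r hm with ⟨heq, hall⟩ | ⟨k, hk, heq, hlt, hbefore, hafter⟩
      · left
        refine ⟨heq, ?_⟩
        intro j hj
        cases j with
        | zero => simp; omega
        | succ j' => simpa using hall j' (by simpa using hj)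
      · right
        refine ⟨k+1, by simpa using hk, ?_, by simpa using hlt, ?_, ?_⟩
        · rw [heq]
          simp only [List.getElem_cons_succ]
          have harith : s + 1 + (k : Int) = s + ((k + 1 : Nat) : Int) := by push_cast; ring
          rw [harith]
        · intro j hj hjk
          cases j with
          | zero =>
            simp only [List.getElem_cons_zero, List.getElem_cons_succ]
            have : t[k] < m := hlt
            omega
          | succ j' =>
            simp only [List.getElem_cons_succ]
            exact hbefore j' (by simpa using hj) (by omega)
        · intro j hj hkj
          cases j with
          | zero => omega
          | succ j' =>
            simp only [List.getElem_cons_succ]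
            exact hafter j' (by simpa using hj) (by omega)

theorem pv_foldl_const {γ δ : Type} (L : List γ) (f : δ → δ) :
    ∀ st : δ, L.foldl (fun s _ => f s) st = f^[L.length] st := by
  induction L with
  | nil => intro st; rfl
  | cons x L ih =>
    intro st
    simp only [List.foldl_cons, List.length_cons, ih, Function.iterate_succ_apply]

theorem pv_drain (MAX_INT : Int) (n : Nat) :
    ∀ (l res : List Int), (pvValid MAX_INT l).length ≤ n →
      ((ordered_index_step MAX_INT)^[n] (l, res)).2 = res ++ pvS MAX_INT l := by
  induction n with
  | zero =>
    intro l res h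
    have hnil : pvValid MAX_INT l = [] := List.length_eq_zero_iff.mp (Nat.le_zero.mp h)
    simp [pvS, hnil, pvSort, PySem.List.sorted2]
  | succ n ih =>
    intro l res h
    rw [Function.iterate_succ_apply]
    rcases pv_inner_go MAX_INT l 0 MAX_INT (-1) le_rfl with ⟨heq, hall⟩ | ⟨k, hk, heq, hlt, hbef, haft⟩
    · -- no slot below MAX_INT: the step is the identity and pvValid is empty
      have hmr : ordered_index_inner l MAX_INT = (MAX_INT, -1) := by rw [pvInner_eq]; exact heq
      have hstep : ordered_index_step MAX_INT (l, res) = (l, res) := by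
        simp [ordered_index_step, hmr]
      have hnil : pvValid MAX_INT l = [] := by
        unfold pvValid
        rw [List.filter_eq_nil_iff]
        intro p hp
        rcases (PySem.List.mem_enumerate_iff l 0 p).mp hp with ⟨j, hj, rfl⟩
        simpa using hall j hj
      rw [hstep]
      exact ih l res (by rw [hnil]; simp)
    · -- the selected slot k: step extracts it and blanks it to MAX_INT
      have hmr : ordered_index_inner l MAX_INT = (l[k], (k : Int)) := by
        rw [pvInner_eq, heq]; norm_num
      have hstep : ordered_index_step MAX_INT (l, res) = (l.set k MAX_INT, res ++ [(k : Int)]) := by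
        simp only [ordered_index_step, hmr]
        rw [if_pos (by omega : ((k : Int)) ≠ -1)]
        simp
      have hA : l = l.take k ++ l[k] :: l.drop (k+1) := by
        rw [← List.drop_eq_getElem_cons hk, List.take_append_drop]
      have hlenA : ((l.take k).length : Int) = (k : Int) := by
        simp [List.length_take]; omega
      have henum : PySem.List.enumerate l 0 =
          PySem.List.enumerate (l.take k) 0 ++
            ((k : Int), l[k]) :: PySem.List.enumerate (l.drop (k+1)) ((k : Int) + 1) := by
        conv_lhs => rw [hA]
        rw [PySem.List.enumerate_append, PySem.List.enumerate_cons]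
        rw [show (0 : Int) + ((l.take k).length : Int) = (k : Int) by rw [hlenA]; ring]
      have hset : l.set k MAX_INT = l.take k ++ MAX_INT :: l.drop (k+1) :=
        List.set_eq_take_cons_drop _ hk
      have henum' : PySem.List.enumerate (l.set k MAX_INT) 0 =
          PySem.List.enumerate (l.take k) 0 ++
            ((k : Int), MAX_INT) :: PySem.List.enumerate (l.drop (k+1)) ((k : Int) + 1) := by
        conv_lhs => rw [hset]
        rw [PySem.List.enumerate_append, PySem.List.enumerate_cons]
        rw [show (0 : Int) + ((l.take k).length : Int) = (k : Int) by rw [hlenA]; ring]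
      have hval_l : pvValid MAX_INT l =
          ((PySem.List.enumerate (l.take k) 0).filter (fun p => p.2 < MAX_INT)) ++
            ((k : Int), l[k]) ::
              ((PySem.List.enumerate (l.drop (k+1)) ((k : Int) + 1)).filter (fun p => p.2 < MAX_INT)) := by
        unfold pvValid
        rw [henum, List.filter_append, List.filter_cons]
        simp [hlt]
      have hval_l' : pvValid MAX_INT (l.set k MAX_INT) =
          ((PySem.List.enumerate (l.take k) 0).filter (fun p => p.2 < MAX_INT)) ++
            ((PySem.List.enumerate (l.drop (k+1)) ((k : Int) + 1)).filter (fun p => p.2 < MAX_INT)) := by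
        unfold pvValid
        rw [henum', List.filter_append, List.filter_cons]
        simp
      have hperm : (pvValid MAX_INT l).Perm (((k : Int), l[k]) :: pvValid MAX_INT (l.set k MAX_INT)) := by
        rw [hval_l, hval_l']
        exact List.perm_middle
      have hlen' : (pvValid MAX_INT (l.set k MAX_INT)).length ≤ n := by
        have := hperm.length_eq
        simp at this
        omega
      have hmem_val' : ∀ p ∈ pvValid MAX_INT (l.set k MAX_INT), pvR (l[k], (k : Int)) (p.2, p.1) := by
        intro p hp
        unfold pvValid at hp
        rcases List.mem_filter.mp hp with ⟨hpmem, hplt⟩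
        rcases (PySem.List.mem_enumerate_iff _ 0 p).mp hpmem with ⟨j, hj, rfl⟩
        have hjl : j < l.length := by simpa using hj
        have hgetset : (l.set k MAX_INT)[j] = if k = j then MAX_INT else l[j] := List.getElem_set _
        by_cases hkj : k = j
        · exfalso
          simp [hkj] at hplt
        · simp only [hgetset, if_neg hkj] at hplt ⊢
          simp only [decide_eq_true_eq] at hplt
          unfold pvR
          simp only []
          rcases Nat.lt_or_ge j k with hjk | hjk
          · exact Or.inl (hbef j hjl hjk)
          · have hkj' : k < j := by omega
            rcases lt_or_eq_of_le (haft j hjl hkj') with h1 | h1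
            · exact Or.inl h1
            · exact Or.inr ⟨h1, by omega⟩
      have hhead : pvSort ((pvValid MAX_INT l).map (fun p => (p.2, p.1))) =
          (l[k], (k : Int)) :: pvSort ((pvValid MAX_INT (l.set k MAX_INT)).map (fun p => (p.2, p.1))) := by
        apply pvSort_eq
        · refine ((pvSort_perm _).cons _).trans ?_
          have hmapped := (hperm.map (fun p : Int × Int => (p.2, p.1))).symm
          simpa using hmapped
        · refine List.pairwise_cons.mpr ⟨?_, pvSort_pairwise _⟩
          intro q hq
          have hq' : q ∈ (pvValid MAX_INT (l.set k MAX_INT)).map (fun p => (p.2, p.1)) :=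
            (pvSort_perm _).mem_iff.mp hq
          rcases List.mem_map.mp hq' with ⟨p, hp, rfl⟩
          exact hmem_val' p hp
      have hS : pvS MAX_INT l = (k : Int) :: pvS MAX_INT (l.set k MAX_INT) := by
        unfold pvS
        rw [hhead]
        simp
      rw [hstep, ih _ _ hlen', hS]
      simp

-- ===== VERDICT (by name: the statement is the Claim_ definition above) =====
theorem ordered_index_spec : Claim_equal_ordered_index := by
  intro l MAX_INT _
  unfold Spec_ordered_index
  have hlen : (PySem.List.pyRange 0 (l.length : Int) 1).length = l.length := by
    rw [PySem.List.length_pyRange_one]; simp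
  have hv : (pvValid MAX_INT l).length ≤ l.length := by
    have h1 := List.length_filter_le (fun p => p.2 < MAX_INT) (PySem.List.enumerate l 0)
    simpa [pvValid, PySem.List.length_enumerate] using h1
  show (((PySem.List.pyRange 0 (l.length : Int) 1).foldl
      (fun st _ => ordered_index_step MAX_INT st) (l, [])).2) = _
  rw [pv_foldl_const, hlen, pv_drain MAX_INT l.length l [] hv]
  rfl
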